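-- pv_equiv track=rewrite | github.com/miguelHx/data-structures-and-algos | src/denis-questions/dict_of_words_anagrams.py | _find_anagram_combos_optimized
-- ===== SOURCE A (Python) =====
-- import copy
-- from typing import List, Set, Dict
-- from itertools import permutations, combinations, product
-- from collections import Counter, defaultdict
--
-- def _is_anagram(s1: str, s2: str) -> bool:
--     """checks if s1 is anagram of s2
--     time: O(n)
--     space: O(n)
--
--     Args:
--         s1 (str): string to compare
--         s2 (str): 2nd string to compare
--
--     Returns:
--         bool: whether or not s1 is anagram of s2
--     """
--     if len(s1) != len(s2):
--         return False
--     return Counter(s1.lower()) == Counter(s2.lower())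
--
-- def _find_anagram_combos_optimized(s: str, words: List[str], combo_sets: List[List[int]]) -> Set[str]:
--     """finds all possible combos that add up to length of s.
--     this algo will put words into buckets associated with
--     their lengths. Then will iterate over the combo_sets list,
--     using each number in subarrays to key the bucket and check
--     for anagrams
--
--     Runtime:
--         O(2^s * Product of b[i] in k arrays * s * l * log(l))
--         where s is the length of input string s,
--         k is the average length of combo subsets,
--         b[i] is the number of words in each bucket
--         grouped by word length,
--         and l is the average length of each cartesian product
--         check operation
--     Space: O(w) where w is # of words in dictionary
--
--     Args:
--         s (str): string to find subset word anagrams of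
--         lst (List[str]): list of words in s
--         combo_sets (List[List[int]]): list of combos that add up to len(s)
--
--     Returns:
--         Set[str]:
--             list of anagrams found in s from words in lst.
--             including multi-word anagrams
--     """
--     anagrams = set()
--     buckets = defaultdict(list)
--     for w in words:
--         buckets[len(w)].append(w)
--
--     for curr_combo_set in combo_sets:
--         s_copy = copy.copy(s)
--         curr_combo_buckets = [buckets[num] for num in curr_combo_set]
--         # cartesian product look for anagrams
--         for cartesian_product_as_tuple in product(*curr_combo_buckets):
--             combo = ''.join(map(str, sorted(cartesian_product_as_tuple)))
--             if _is_anagram(s, combo):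
--                 anagrams.add(combo)
--     return anagrams
-- ===== SOURCE B (Python) =====
-- from typing import List, Set
--
--
-- def _try_remove(remaining: List[str], w: str) -> List[str]:
--     """Remove the letters of w.lower() from remaining (a list of chars).
--     Returns the leftover list, or None if some letter is not available."""
--     r = list(remaining)
--     for c in w.lower():
--         if c in r:
--             r.remove(c)
--         else:
--             return None
--     return r
--
--
-- def _find_anagram_combos_optimized(s: str, words: List[str], combo_sets: List[List[int]]) -> Set[str]:
--     """DFS/backtracking over the positions of each combo set, subtracting the
--     letters of each candidate word from the remaining letters of s and pruning
--     a branch as soon as a letter is unavailable."""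
--     anagrams = set()
--     buckets = {}
--     for w in words:
--         buckets.setdefault(len(w), []).append(w)
--     target = list(s.lower())
--
--     def dfs(bucket_lists, i, remaining, chosen):
--         if i == len(bucket_lists):
--             if not remaining:
--                 anagrams.add(''.join(sorted(chosen)))
--             return
--         for w in bucket_lists[i]:
--             r = _try_remove(remaining, w)
--             if r is not None:
--                 dfs(bucket_lists, i + 1, r, chosen + [w])
--
--     for combo in combo_sets:
--         dfs([buckets.get(num, []) for num in combo], 0, target, [])
--     return anagrams
-- ===== Notes on version B (the rewrite author's own statement) =====
-- stated objective: faster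
-- what changed: Replaces the full itertools.product scan (which builds, sorts and counter-checks every tuple of bucket words) by DFS/backtracking over the combo-set positions that incrementally removes each chosen word's letters from the remaining letters of s and prunes a branch as soon as a letter is unavailable.
import Mathlib
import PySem

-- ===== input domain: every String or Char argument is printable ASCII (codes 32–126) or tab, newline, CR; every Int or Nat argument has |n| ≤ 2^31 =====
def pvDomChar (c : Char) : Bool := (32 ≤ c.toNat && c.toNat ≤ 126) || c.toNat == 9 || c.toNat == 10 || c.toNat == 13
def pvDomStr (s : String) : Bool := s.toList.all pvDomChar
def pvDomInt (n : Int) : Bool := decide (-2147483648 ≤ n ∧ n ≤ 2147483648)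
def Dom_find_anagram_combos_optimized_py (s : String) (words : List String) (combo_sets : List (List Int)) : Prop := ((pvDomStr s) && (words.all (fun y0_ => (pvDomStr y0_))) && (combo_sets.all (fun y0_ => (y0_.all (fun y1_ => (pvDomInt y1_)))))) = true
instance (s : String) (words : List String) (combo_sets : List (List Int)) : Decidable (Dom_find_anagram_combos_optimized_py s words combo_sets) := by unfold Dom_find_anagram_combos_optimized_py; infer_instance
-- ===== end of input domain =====

-- B replaces A's full cartesian product of the length buckets by DFS/backtracking over the
-- combo positions with incremental letter removal and pruning (objective: faster on pruned inputs;
-- return-value equivalence only — A mutates nothing observable).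

-- ===== PORT A =====
-- ''.join(map(str, sorted(t)))  (map(str, ·) is the identity on strings)
def pvJoinSorted (t : List String) : String :=
  PySem.Str.join "" (PySem.List.sorted t (fun x => x) false)

-- Python's Counter(x) == Counter(y): dict equality ignoring order; exact here because a Counter
-- built from a string stores no zero counts, so getD with default 0 agrees with dict lookup.
def pvCounterEq (d1 d2 : PySem.Dict Char Int) : Bool :=
  (d1.keys.all fun k => d2.getD k 0 == d1.getD k 0) &&
  (d2.keys.all fun k => d1.getD k 0 == d2.getD k 0)

def is_anagram_py (s1 s2 : String) : Bool :=
  if PySem.Str.len s1 != PySem.Str.len s2 then false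
  else pvCounterEq (PySem.Dict.counter (PySem.Str.lower s1).toList)
                   (PySem.Dict.counter (PySem.Str.lower s2).toList)

-- itertools.product(*buckets), leftmost factor varying slowest
def pyProduct (bs : List (List String)) : List (List String) :=
  match bs with
  | [] => [[]]
  | b :: rest => b.flatMap (fun w => (pyProduct rest).map (w :: ·))

-- defaultdict access buckets[num] inserts [] for a missing key; that inserted value is empty and
-- the dict is only ever read through getD _ [], so the access is ported as getD (observationally exact).
-- s_copy = copy.copy(s) is unused dead code in A and is not ported.
def find_anagram_combos_optimized_py (s : String) (words : List String) (combo_sets : List (List Int)) : List String :=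
  let buckets := words.foldl (fun d w => d.modify (PySem.Str.len w) [] (· ++ [w])) PySem.Dict.empty
  combo_sets.foldl (fun anagrams curr_combo_set =>
    let curr_combo_buckets := curr_combo_set.map (fun num => buckets.getD num [])
    (pyProduct curr_combo_buckets).foldl (fun anagrams t =>
      let combo := pvJoinSorted t
      if is_anagram_py s combo then PySem.Set.add anagrams combo else anagrams) anagrams)
    PySem.Set.empty

-- ===== PORT B =====
-- _try_remove: walk w.lower(), removing each char's first occurrence from remaining; none on failure
def pvRemoveChars (rem : List Char) (cs : List Char) : Option (List Char) :=
  match cs with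
  | [] => some rem
  | c :: cs' => if rem.contains c then pvRemoveChars (rem.erase c) cs' else none

def pvDfs (bls : List (List String)) (rem : List Char) (chosen : List String)
    (anagrams : PySem.Set String) : PySem.Set String :=
  match bls with
  | [] => if rem.isEmpty then PySem.Set.add anagrams (pvJoinSorted chosen) else anagrams
  | b :: rest =>
    b.foldl (fun anagrams w =>
      match pvRemoveChars rem (PySem.Str.lower w).toList with
      | none => anagrams
      | some r => pvDfs rest r (chosen ++ [w]) anagrams) anagrams

def find_anagram_combos_optimized_py_alt (s : String) (words : List String) (combo_sets : List (List Int)) : List String :=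
  let buckets := words.foldl (fun d w => d.modify (PySem.Str.len w) [] (· ++ [w])) PySem.Dict.empty
  let target := (PySem.Str.lower s).toList
  combo_sets.foldl (fun anagrams combo =>
      pvDfs (combo.map (fun num => buckets.getD num [])) target [] anagrams)
    PySem.Set.empty

-- ===== PRECONDITION & SPEC =====
def Spec_find_anagram_combos_optimized_py (s : String) (words : List String) (combo_sets : List (List Int)) (out : List String) : Prop := out = find_anagram_combos_optimized_py_alt s words combo_sets
instance (s : String) (words : List String) (combo_sets : List (List Int)) (out : List String) : Decidable (Spec_find_anagram_combos_optimized_py s words combo_sets out) := by unfold Spec_find_anagram_combos_optimized_py; infer_instance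

-- ===== CLAIM (what is proved, stated in full; the proofs are below) =====
def Claim_equal_find_anagram_combos_optimized_py : Prop := ∀ (s : String) (words : List String) (combo_sets : List (List Int)), Dom_find_anagram_combos_optimized_py s words combo_sets → Spec_find_anagram_combos_optimized_py s words combo_sets (find_anagram_combos_optimized_py s words combo_sets)

-- ===== LEMMAS AND PROOFS =====

-- pvRemoveChars succeeds with [] exactly on a permutation of the remaining letters
theorem pvRemoveChars_some_perm {rem cs r : List Char}
    (h : pvRemoveChars rem cs = some r) : (cs ++ r).Perm rem := by
  induction cs generalizing rem with
  | nil => simp [pvRemoveChars] at h; simp [h]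
  | cons c cs' ih =>
    simp only [pvRemoveChars] at h
    split at h
    · rename_i hc
      have := ih h
      have hperm : (c :: (cs' ++ r)).Perm (c :: rem.erase c) := this.cons c
      have : (c :: rem.erase c).Perm rem := (List.perm_cons_erase (by simpa using hc)).symm
      simpa using hperm.trans this
    · exact absurd h (by simp)

theorem pvRemoveChars_of_perm {cs rem : List Char}
    (h : cs.Perm rem) : pvRemoveChars rem cs = some [] := by
  induction cs generalizing rem with
  | nil => simp [pvRemoveChars]; exact (h.nil_eq).symm
  | cons c cs' ih =>
    rw [List.cons_perm_iff_perm_erase] at h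
    simp only [pvRemoveChars, List.contains_iff_mem] at *
    rw [if_pos (by simpa using h.1)]
    exact ih h.2

theorem pvRemoveChars_iff (rem cs : List Char) :
    pvRemoveChars rem cs = some [] ↔ cs.Perm rem := by
  constructor
  · intro h; simpa using pvRemoveChars_some_perm h
  · exact pvRemoveChars_of_perm

theorem pvRemoveChars_append (rem xs ys : List Char) :
    pvRemoveChars rem (xs ++ ys) = (pvRemoveChars rem xs).bind (fun r => pvRemoveChars r ys) := by
  induction xs generalizing rem with
  | nil => simp [pvRemoveChars]
  | cons c cs ih =>
    simp only [pvRemoveChars, List.cons_append]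
    split <;> simp [ih]

-- pvCounterEq on counters = equality of all character counts
theorem pvCounterEq_counter_iff (xs ys : List Char) :
    pvCounterEq (PySem.Dict.counter xs) (PySem.Dict.counter ys) = true ↔
      ∀ c, xs.count c = ys.count c := by
  unfold pvCounterEq
  simp only [Bool.and_eq_true, List.all_eq_true, PySem.Dict.keys_counter,
    PySem.Set.mem_ofList, PySem.Dict.getD_counter, beq_iff_eq]
  constructor
  · rintro ⟨h1, h2⟩ c
    by_cases hx : c ∈ xs
    · exact_mod_cast (h1 c hx).symm
    · by_cases hy : c ∈ ys
      · exact_mod_cast (h2 c hy)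
      · simp [List.count_eq_zero_of_not_mem, hx, hy]
  · intro h
    exact ⟨fun k _ => by exact_mod_cast (h k).symm, fun k _ => by exact_mod_cast h k⟩

theorem lower_flatten (xss : List (List Char)) :
    PySem.Chars.lower xss.flatten = (xss.map PySem.Chars.lower).flatten := by
  simp only [PySem.Chars.lower, List.map_flatten]
  rfl

theorem join_empty_flatten (parts : List (List Char)) :
    PySem.Chars.join [] parts = parts.flatten := by
  induction parts with
  | nil => rfl
  | cons p ps ih =>
    simp only [PySem.Chars.join, List.intercalate] at *
    cases ps <;> simp_all [List.intersperse]

-- the letters of pvJoinSorted t, lowered, are a permutation of the lowered letters of t in order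
theorem lower_joinSorted_perm (t : List String) :
    (PySem.Str.lower (pvJoinSorted t)).toList.Perm
      (t.flatMap (fun w => (PySem.Str.lower w).toList)) := by
  rw [PySem.Str.toList_lower, pvJoinSorted, PySem.Str.toList_join]
  have h0 : ("" : String).toList = [] := rfl
  rw [h0, join_empty_flatten, lower_flatten]
  have hperm : (PySem.List.sorted t (fun x => x) false).Perm t :=
    PySem.List.sorted_perm t (fun x => x) false
  have h2 : (((PySem.List.sorted t (fun x => x) false).map
      (fun w => PySem.Chars.lower w.toList)).flatten).Perm
      ((t.map (fun w => PySem.Chars.lower w.toList)).flatten) :=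
    (hperm.map _).flatten
  have e1 : ((PySem.List.sorted t (fun x => x) false).map String.toList).map PySem.Chars.lower
      = (PySem.List.sorted t (fun x => x) false).map (fun w => PySem.Chars.lower w.toList) := by
    simp [List.map_map, Function.comp]
  have e2 : t.flatMap (fun w => (PySem.Str.lower w).toList)
      = (t.map (fun w => PySem.Chars.lower w.toList)).flatten := by
    simp [List.flatMap_def, PySem.Str.toList_lower]
  rw [e1, e2]
  exact h2

theorem length_lower (cs : List Char) : (PySem.Chars.lower cs).length = cs.length := by
  simp [PySem.Chars.lower]

-- the crux: A's per-tuple anagram test = success of B's incremental removal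
theorem is_anagram_iff_remove (s : String) (t : List String) :
    is_anagram_py s (pvJoinSorted t) = true ↔
      pvRemoveChars (PySem.Str.lower s).toList (t.flatMap (fun w => (PySem.Str.lower w).toList))
        = some [] := by
  rw [pvRemoveChars_iff]
  constructor
  · intro h
    unfold is_anagram_py at h
    split at h
    · exact absurd h (by simp)
    · have hcnt := (pvCounterEq_counter_iff _ _).mp h
      have hperm : (PySem.Str.lower s).toList.Perm (PySem.Str.lower (pvJoinSorted t)).toList :=
        List.perm_iff_count.mpr (by intro a; exact (hcnt a))
      exact ((lower_joinSorted_perm t).symm.trans hperm.symm)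
  · intro h
    have hperm : (PySem.Str.lower (pvJoinSorted t)).toList.Perm (PySem.Str.lower s).toList :=
      (lower_joinSorted_perm t).trans h
    have hlen : (PySem.Str.lower (pvJoinSorted t)).toList.length = (PySem.Str.lower s).toList.length :=
      hperm.length_eq
    simp only [PySem.Str.toList_lower, length_lower] at hlen
    unfold is_anagram_py
    rw [if_neg]
    · exact (pvCounterEq_counter_iff _ _).mpr (fun c =>
        List.perm_iff_count.mp hperm.symm c)
    · simp only [bne_iff_ne, ne_eq, not_not, PySem.Str.len]
      omega

-- DFS over bucket lists = the filtered fold over the full cartesian product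
theorem pvDfs_eq_product (bls : List (List String)) :
    ∀ (rem : List Char) (chosen : List String) (an : PySem.Set String),
    pvDfs bls rem chosen an =
      (pyProduct bls).foldl (fun an t =>
        match pvRemoveChars rem (t.flatMap (fun w => (PySem.Str.lower w).toList)) with
        | some [] => PySem.Set.add an (pvJoinSorted (chosen ++ t))
        | _ => an) an := by
  induction bls with
  | nil =>
    intro rem chosen an
    simp only [pvDfs, pyProduct, List.foldl_cons, List.foldl_nil, List.flatMap_nil, pvRemoveChars]
    cases rem <;> simp
  | cons b rest ih =>
    intro rem chosen an
    simp only [pvDfs, pyProduct]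
    rw [List.foldl_flatMap]
    refine PySem.List.foldl_congr_mem _ _ _ _ ?_
    intro an w _
    rw [List.foldl_map]
    cases hrw : pvRemoveChars rem (PySem.Str.lower w).toList with
    | none =>
      have : ∀ an' t, (fun (an : PySem.Set String) t =>
          match pvRemoveChars rem ((w :: t).flatMap (fun w => (PySem.Str.lower w).toList)) with
          | some [] => PySem.Set.add an (pvJoinSorted (chosen ++ w :: t))
          | _ => an) an' t = an' := by
        intro an' t
        simp only [List.flatMap_cons]
        rw [pvRemoveChars_append, hrw]
        rfl
      simp only []
      rw [PySem.List.foldl_congr_mem _ _ (fun a _ => a) _ (by intro acc x _; exact this acc x)]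
      simp
    | some r =>
      show pvDfs rest r (chosen ++ [w]) an = _
      rw [ih r (chosen ++ [w]) an]
      refine PySem.List.foldl_congr_mem _ _ _ _ ?_
      intro acc t _
      simp only [List.flatMap_cons]
      rw [pvRemoveChars_append, hrw, List.append_assoc]
      rfl

-- per combo set: A's product scan = B's DFS
theorem per_combo (s : String) (cbs : List (List String)) (an : PySem.Set String) :
    (pyProduct cbs).foldl (fun anagrams t =>
      let combo := pvJoinSorted t
      if is_anagram_py s combo then PySem.Set.add anagrams combo else anagrams) an =
    pvDfs cbs (PySem.Str.lower s).toList [] an := by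
  rw [pvDfs_eq_product]
  refine PySem.List.foldl_congr_mem _ _ _ _ ?_
  intro acc t _
  simp only [List.nil_append]
  by_cases h : is_anagram_py s (pvJoinSorted t) = true
  · rw [if_pos h, (is_anagram_iff_remove s t).mp h]
  · rw [if_neg h]
    cases hr : pvRemoveChars (PySem.Str.lower s).toList
        (t.flatMap (fun w => (PySem.Str.lower w).toList)) with
    | none => rfl
    | some r =>
      cases r with
      | nil => exact absurd ((is_anagram_iff_remove s t).mpr hr) h
      | cons _ _ => rfl

-- ===== VERDICT (by name: the statement is the Claim_ definition above) =====
theorem find_anagram_combos_optimized_py_spec : Claim_equal_find_anagram_combos_optimized_py := by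
  intro s words combo_sets _
  unfold Spec_find_anagram_combos_optimized_py
  unfold find_anagram_combos_optimized_py find_anagram_combos_optimized_py_alt
  refine PySem.List.foldl_congr_mem _ _ _ _ ?_
  intro acc combo _
  exact per_combo s _ acc
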